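-- pv_equiv track=rewrite | github.com/ahmadrezash/Codeforces | 427A.py | calculate
-- ===== SOURCE A (Python) =====
-- from typing import List
--
-- def calculate(a: List[int]) -> int:
-- 	agent_count = 0
-- 	crime_count = 0
-- 	for i in a:
-- 		if i >= 1:
-- 			agent_count += i
-- 		elif i == -1:
-- 			if agent_count > 0:
-- 				agent_count -= 1
-- 			else:
-- 				crime_count += 1
-- 	return crime_count
-- ===== SOURCE B (Python) =====
-- def calculate(a):
--     s = 0
--     lowest = 0
--     for i in a:
--         if i >= 1:
--             s += i
--         elif i == -1:
--             s -= 1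
--         if s < lowest:
--             lowest = s
--     return -lowest
-- ===== Notes on version B (the rewrite author's own statement) =====
-- stated objective: alternative
-- what changed: Instead of simulating a floored agent pool and counting shortfalls inline, B tracks a signed running balance and its prefix minimum, returning the negated trough.
import Mathlib
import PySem

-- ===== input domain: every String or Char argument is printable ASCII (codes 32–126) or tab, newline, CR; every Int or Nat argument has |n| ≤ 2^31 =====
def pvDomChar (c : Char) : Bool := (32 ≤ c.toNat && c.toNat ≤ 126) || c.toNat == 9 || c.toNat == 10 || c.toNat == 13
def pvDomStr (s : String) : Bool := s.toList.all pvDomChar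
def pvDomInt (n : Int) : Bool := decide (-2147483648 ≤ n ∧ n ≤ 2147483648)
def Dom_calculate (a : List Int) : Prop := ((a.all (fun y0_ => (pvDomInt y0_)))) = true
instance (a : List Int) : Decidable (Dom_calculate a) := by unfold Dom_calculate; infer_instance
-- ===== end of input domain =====

-- B replaces A's floored agent-pool simulation with a signed running balance whose
-- prefix minimum is negated at the end (alternative decomposition, same O(n) cost).

-- ===== PORT A =====
def calculate (a : List Int) : Int :=
  (a.foldl
    (fun st i =>
      if i ≥ 1 then (st.1 + i, st.2)
      else if i = -1 then
        (if st.1 > 0 then (st.1 - 1, st.2) else (st.1, st.2 + 1))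
      else st)
    (0, 0)).2

-- ===== PORT B =====
def calculate_alt (a : List Int) : Int :=
  let st := a.foldl
    (fun st i =>
      let s := if i ≥ 1 then st.1 + i else if i = -1 then st.1 - 1 else st.1
      (s, if s < st.2 then s else st.2))
    (0, 0)
  (-st.2)

-- ===== PRECONDITION & SPEC =====
def Spec_calculate (a : List Int) (out : Int) : Prop := out = calculate_alt a
instance (a : List Int) (out : Int) : Decidable (Spec_calculate a out) := by unfold Spec_calculate; infer_instance

-- ===== CLAIM (what is proved, stated in full; the proofs are below) =====
def Claim_equal_calculate : Prop := ∀ (a : List Int), Dom_calculate a → Spec_calculate a (calculate a)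

-- ===== LEMMAS AND PROOFS =====

-- Loop invariant: A's state (agent, crime) equals (s - low, -low) for B's state (s, low),
-- provided low ≤ s and low ≤ 0.
theorem calc_inv (l : List Int) :
    ∀ (s low : Int), low ≤ s → low ≤ 0 →
    (l.foldl
      (fun st i =>
        if i ≥ 1 then (st.1 + i, st.2)
        else if i = -1 then
          (if st.1 > 0 then (st.1 - 1, st.2) else (st.1, st.2 + 1))
        else st)
      (s - low, -low)).2 =
    -(l.foldl
      (fun st i =>
        let s' := if i ≥ 1 then st.1 + i else if i = -1 then st.1 - 1 else st.1
        (s', if s' < st.2 then s' else st.2))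
      (s, low)).2 ∧
    (l.foldl
      (fun st i =>
        if i ≥ 1 then (st.1 + i, st.2)
        else if i = -1 then
          (if st.1 > 0 then (st.1 - 1, st.2) else (st.1, st.2 + 1))
        else st)
      (s - low, -low)).1 =
    (l.foldl
      (fun st i =>
        let s' := if i ≥ 1 then st.1 + i else if i = -1 then st.1 - 1 else st.1
        (s', if s' < st.2 then s' else st.2))
      (s, low)).1 -
    (l.foldl
      (fun st i =>
        let s' := if i ≥ 1 then st.1 + i else if i = -1 then st.1 - 1 else st.1
        (s', if s' < st.2 then s' else st.2))
      (s, low)).2 := by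
  induction l with
  | nil => intro s low _ _; constructor <;> simp
  | cons i t ih =>
    intro s low hls hl0
    simp only [List.foldl]
    by_cases h1 : i ≥ 1
    · simp only [if_pos h1]
      have hlt : ¬ (s + i < low) := by omega
      rw [if_neg hlt, show s - low + i = s + i - low from by ring]
      exact ih (s + i) low (by omega) hl0
    · simp only [if_neg h1]
      by_cases h2 : i = -1
      · simp only [if_pos h2]
        by_cases h3 : s - low > 0
        · rw [if_pos h3]
          have hlt : ¬ (s - 1 < low) := by omega
          rw [if_neg hlt, show s - low - 1 = s - 1 - low from by ring]
          exact ih (s - 1) low (by omega) hl0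
        · rw [if_neg h3]
          have hlt : s - 1 < low := by omega
          rw [if_pos hlt,
              show s - low = (s - 1) - (s - 1) from by omega,
              show -low + 1 = -(s - 1) from by omega]
          exact ih (s - 1) (s - 1) (le_refl _) (by omega)
      · simp only [if_neg h2]
        rw [if_neg (by omega : ¬ s < low)]
        exact ih s low hls hl0

-- ===== VERDICT (by name: the statement is the Claim_ definition above) =====
theorem calculate_spec : Claim_equal_calculate := by
  intro a _
  unfold Spec_calculate calculate calculate_alt
  have h := (calc_inv a 0 0 (le_refl _) (le_refl _)).1
  simp only [sub_zero, neg_zero] at h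
  exact h.symm ▸ rfl
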